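-- pv_equiv track=rewrite | github.com/Chiamakabrowneyes/Elevator-Algorithm-Model-Code | main.py | users_per_floor
-- ===== SOURCE A (Python) =====
-- def users_per_floor(position_list):
--     floor1 = 0
--     floor2 = 0
--     floor3 = 0
--     floor4 = 0
--     floor5 = 0
--     floor6 = 0
--     floor7 = 0
--     #[(50, -200), (50, -130), (50, -60), (50, 10), (50, 80) ,(50, 150), (50, 220)]
--     for i in position_list:
--         position_y = i[1]
--         if position_y >= -200 and position_y < -130:
--             floor1 += 1
--         elif position_y >= -130 and position_y < -60:
--             floor2 += 1
--         elif position_y >= -60 and position_y < 10: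
--             floor3 += 1
--         elif position_y >= 10 and position_y < 80:
--             floor4 += 1
--         elif position_y >= 80 and position_y < 150:
--             floor5 += 1
--         elif position_y >= 150 and position_y < 220:
--             floor6 += 1
--         elif position_y >= 220:
--             floor7 +=1
--     return [floor1, floor2, floor3, floor4, floor5, floor6, floor7]
-- ===== SOURCE B (Python) =====
-- def users_per_floor(position_list):
--     result = [0] * 7
--     for i in position_list:
--         idx = (i[1] + 200) // 70
--         if idx >= 0:
--             result[min(idx, 6)] += 1
--     return result
-- ===== Notes on version B (the rewrite author's own statement) =====
-- stated objective: simpler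
-- what changed: Replaces the seven-branch comparison ladder and seven named counters with one arithmetic bucket index (y+200)//70 clamped into a 7-slot list.
import Mathlib
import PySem

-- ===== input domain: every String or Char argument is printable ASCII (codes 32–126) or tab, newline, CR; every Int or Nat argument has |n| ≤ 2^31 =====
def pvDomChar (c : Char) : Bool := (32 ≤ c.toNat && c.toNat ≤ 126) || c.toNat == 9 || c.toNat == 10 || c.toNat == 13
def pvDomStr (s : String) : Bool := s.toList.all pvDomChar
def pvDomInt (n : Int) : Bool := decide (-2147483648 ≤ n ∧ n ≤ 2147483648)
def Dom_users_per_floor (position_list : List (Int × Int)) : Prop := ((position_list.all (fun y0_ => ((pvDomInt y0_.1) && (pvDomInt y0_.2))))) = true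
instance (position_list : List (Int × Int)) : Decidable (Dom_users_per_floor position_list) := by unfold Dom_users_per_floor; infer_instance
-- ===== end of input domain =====

-- B replaces A's seven-branch comparison ladder with one arithmetic bucket index (y+200)//70 into a 7-slot list: simpler.


-- ===== PORT A =====
-- loop with the seven named counters, branches in A's order
def usersGoA : List (Int × Int) → Int → Int → Int → Int → Int → Int → Int → List Int
  | [], f1, f2, f3, f4, f5, f6, f7 => [f1, f2, f3, f4, f5, f6, f7]
  | i :: rest, f1, f2, f3, f4, f5, f6, f7 =>
    let y := i.2
    if -200 ≤ y ∧ y < -130 then usersGoA rest (f1+1) f2 f3 f4 f5 f6 f7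
    else if -130 ≤ y ∧ y < -60 then usersGoA rest f1 (f2+1) f3 f4 f5 f6 f7
    else if -60 ≤ y ∧ y < 10 then usersGoA rest f1 f2 (f3+1) f4 f5 f6 f7
    else if 10 ≤ y ∧ y < 80 then usersGoA rest f1 f2 f3 (f4+1) f5 f6 f7
    else if 80 ≤ y ∧ y < 150 then usersGoA rest f1 f2 f3 f4 (f5+1) f6 f7
    else if 150 ≤ y ∧ y < 220 then usersGoA rest f1 f2 f3 f4 f5 (f6+1) f7
    else if 220 ≤ y then usersGoA rest f1 f2 f3 f4 f5 f6 (f7+1)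
    else usersGoA rest f1 f2 f3 f4 f5 f6 f7

def users_per_floor (position_list : List (Int × Int)) : List Int :=
  usersGoA position_list 0 0 0 0 0 0 0

-- ===== PORT B =====
-- result[k] += 1
def usersBump (l : List Int) (k : Nat) : List Int := l.set k (l.getD k 0 + 1)

def usersStepB (result : List Int) (i : Int × Int) : List Int :=
  let idx := PySem.Int.floordiv (i.2 + 200) 70
  if 0 ≤ idx then usersBump result (min idx 6).toNat else result

def users_per_floor_alt (position_list : List (Int × Int)) : List Int :=
  position_list.foldl usersStepB [0, 0, 0, 0, 0, 0, 0]

-- ===== PRECONDITION & SPEC =====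
def Spec_users_per_floor (position_list : List (Int × Int)) (out : List Int) : Prop := out = users_per_floor_alt position_list
instance (position_list : List (Int × Int)) (out : List Int) : Decidable (Spec_users_per_floor position_list out) := by unfold Spec_users_per_floor; infer_instance

-- ===== CLAIM (what is proved, stated in full; the proofs are below) =====
def Claim_equal_users_per_floor : Prop := ∀ (position_list : List (Int × Int)), Dom_users_per_floor position_list → Spec_users_per_floor position_list (users_per_floor position_list)

-- ===== LEMMAS AND PROOFS =====
theorem usersGo_eq_foldl (l : List (Int × Int)) :
    ∀ f1 f2 f3 f4 f5 f6 f7 : Int,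
      usersGoA l f1 f2 f3 f4 f5 f6 f7 = l.foldl usersStepB [f1, f2, f3, f4, f5, f6, f7] := by
  induction l with
  | nil => intro f1 f2 f3 f4 f5 f6 f7; rfl
  | cons i rest ih =>
    intro f1 f2 f3 f4 f5 f6 f7
    have hq := PySem.Int.floordiv_mul_add_mod (i.2 + 200) 70
    have hr0 := PySem.Int.mod_nonneg (i.2 + 200) (b := 70) (by omega)
    have hr1 := PySem.Int.mod_lt (i.2 + 200) (b := 70) (by omega)
    set q := PySem.Int.floordiv (i.2 + 200) 70 with hqdef
    rw [List.foldl_cons]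
    show (if -200 ≤ i.2 ∧ i.2 < -130 then usersGoA rest (f1+1) f2 f3 f4 f5 f6 f7
      else if -130 ≤ i.2 ∧ i.2 < -60 then usersGoA rest f1 (f2+1) f3 f4 f5 f6 f7
      else if -60 ≤ i.2 ∧ i.2 < 10 then usersGoA rest f1 f2 (f3+1) f4 f5 f6 f7
      else if 10 ≤ i.2 ∧ i.2 < 80 then usersGoA rest f1 f2 f3 (f4+1) f5 f6 f7
      else if 80 ≤ i.2 ∧ i.2 < 150 then usersGoA rest f1 f2 f3 f4 (f5+1) f6 f7
      else if 150 ≤ i.2 ∧ i.2 < 220 then usersGoA rest f1 f2 f3 f4 f5 (f6+1) f7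
      else if 220 ≤ i.2 then usersGoA rest f1 f2 f3 f4 f5 f6 (f7+1)
      else usersGoA rest f1 f2 f3 f4 f5 f6 f7)
      = List.foldl usersStepB (usersStepB [f1, f2, f3, f4, f5, f6, f7] i) rest
    have hstep : ∀ (st : List Int), usersStepB st i =
        (if 0 ≤ q then usersBump st (min q 6).toNat else st) := by
      intro st; simp [usersStepB, hqdef]
    split_ifs with h1 h2 h3 h4 h5 h6 h7
    · have : q = 0 := by omega
      rw [hstep, this]; simp [usersBump]; exact ih ..
    · have : q = 1 := by omega
      rw [hstep, this]; simp [usersBump, List.set, List.getD]; exact ih ..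
    · have : q = 2 := by omega
      rw [hstep, this]; simp [usersBump, List.set, List.getD]; exact ih ..
    · have : q = 3 := by omega
      rw [hstep, this]; simp [usersBump, List.set, List.getD]; exact ih ..
    · have : q = 4 := by omega
      rw [hstep, this]; simp [usersBump, List.set, List.getD]; exact ih ..
    · have : q = 5 := by omega
      rw [hstep, this]; simp [usersBump, List.set, List.getD]; exact ih ..
    · have h6le : (6 : Int) ≤ q := by omega
      rw [hstep, if_pos (by omega), min_eq_right h6le]
      simp [usersBump, List.set, List.getD]; exact ih ..
    · have hneg : q < 0 := by omega
      rw [hstep, if_neg (by omega)]; exact ih ..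

-- ===== VERDICT (by name: the statement is the Claim_ definition above) =====
theorem users_per_floor_spec : Claim_equal_users_per_floor := by
  intro l _
  show users_per_floor l = users_per_floor_alt l
  exact usersGo_eq_foldl l 0 0 0 0 0 0 0
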